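-- pv_equiv track=rewrite | github.com/EduardAvojan/Nerion-V2- | nerion_digital_physicist/data_mining/github_quality_scraper.py | _validate_go_syntax
-- ===== SOURCE A (Python) =====
-- def _validate_go_syntax(before_code: str, after_code: str) -> bool:
--     """Validate Go syntax using heuristics."""
--     for code in [before_code, after_code]:
--         # Must have some substance
--         lines = [l.strip() for l in code.split('\n') if l.strip() and not l.strip().startswith('//')]
--         if len(lines) < 3:
--             return False
--
--         # Check for balanced braces
--         if code.count('{') != code.count('}'):
--             return False
--         if code.count('(') != code.count(')'):
--             return False
--         if code.count('[') != code.count(']'):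
--             return False
--
--     return True
-- ===== SOURCE B (Python) =====
-- def _scan(code: str):
--     # One streaming pass: a per-line state machine classifies each line
--     # (0 = in leading whitespace, 1 = first non-ws char was '/', 2 = substantial,
--     #  3 = '//' comment) while three signed bracket balances accumulate.
--     substantial = 0
--     phase = 0
--     braces = parens = brackets = 0
--     for ch in code:
--         if ch == '\n':
--             if phase == 1 or phase == 2:
--                 substantial += 1
--             phase = 0
--             continue
--         if phase == 0:
--             if ch == '/':
--                 phase = 1
--             elif not ch.isspace():
--                 phase = 2
--         elif phase == 1:
--             phase = 3 if ch == '/' else 2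
--         if ch == '{':
--             braces += 1
--         elif ch == '}':
--             braces -= 1
--         elif ch == '(':
--             parens += 1
--         elif ch == ')':
--             parens -= 1
--         elif ch == '[':
--             brackets += 1
--         elif ch == ']':
--             brackets -= 1
--     if phase == 1 or phase == 2:
--         substantial += 1
--     return substantial, braces, parens, brackets
--
--
-- def _validate_go_syntax(before_code: str, after_code: str) -> bool:
--     for code in (before_code, after_code):
--         substantial, braces, parens, brackets = _scan(code)
--         if substantial < 3 or braces or parens or brackets:
--             return False
--     return True
-- ===== Notes on version B (the rewrite author's own statement) =====
-- stated objective: alternative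
-- what changed: Replaces A's split('\n')/strip()/startswith line-list construction and six separate str.count full scans by ONE streaming character pass per string: a four-state per-line machine (leading-whitespace / lone '/' / substantial / comment) counts substantial lines while three signed bracket balances accumulate in the same loop.
import Mathlib
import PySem

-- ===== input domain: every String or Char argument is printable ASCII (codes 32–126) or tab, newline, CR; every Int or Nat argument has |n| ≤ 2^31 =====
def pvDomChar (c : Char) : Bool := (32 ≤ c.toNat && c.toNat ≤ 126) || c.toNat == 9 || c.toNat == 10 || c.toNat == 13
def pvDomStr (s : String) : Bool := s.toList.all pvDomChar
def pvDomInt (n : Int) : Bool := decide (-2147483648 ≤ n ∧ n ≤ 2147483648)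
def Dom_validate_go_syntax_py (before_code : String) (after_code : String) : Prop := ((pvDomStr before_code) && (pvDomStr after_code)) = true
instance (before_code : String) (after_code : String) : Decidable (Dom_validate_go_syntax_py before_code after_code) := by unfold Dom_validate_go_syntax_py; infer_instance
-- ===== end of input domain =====

-- B replaces A's split/strip/startswith line processing and six full-string str.count scans
-- by ONE streaming character pass per string: a per-line state machine (leading-ws / lone '/'
-- / substantial / comment) counts substantial lines while three signed bracket balances
-- accumulate in the same pass (alternative single-pass algorithm; return value only).

-- ===== PORT A =====
-- the per-code body of A's `for code in [before_code, after_code]` loop (early return False = this returns false)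
def vgsA_one (code : String) : Bool :=
  let lines := ((PySem.Chars.splitOn code.toList ['\n']).filter
      (fun l => !(PySem.Chars.strip l).isEmpty &&
                !(PySem.Chars.startswith (PySem.Chars.strip l) ['/', '/']))).map PySem.Chars.strip
  if lines.length < 3 then false
  else if PySem.Chars.count code.toList ['{'] ≠ PySem.Chars.count code.toList ['}'] then false
  else if PySem.Chars.count code.toList ['('] ≠ PySem.Chars.count code.toList [')'] then false
  else if PySem.Chars.count code.toList ['['] ≠ PySem.Chars.count code.toList [']'] then false
  else true

def validate_go_syntax_py (before_code : String) (after_code : String) : Bool :=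
  if vgsA_one before_code = false then false
  else if vgsA_one after_code = false then false
  else true

-- ===== PORT B =====
-- one step of Source B's character loop; state = (substantial, phase, braces, parens, brackets)
def vgsB_step (st : Int × Nat × Int × Int × Int) (ch : Char) : Int × Nat × Int × Int × Int :=
  match st with
  | (sub, ph, c, p, s) =>
    if ch == '\n' then
      ((if ph == 1 || ph == 2 then sub + 1 else sub), 0, c, p, s)
    else
      let ph' := if ph == 0 then (if ch == '/' then 1 else if !(PySem.Chars.isspace ch) then 2 else 0)
                 else if ph == 1 then (if ch == '/' then 3 else 2)
                 else ph
      if ch == '{' then (sub, ph', c + 1, p, s)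
      else if ch == '}' then (sub, ph', c - 1, p, s)
      else if ch == '(' then (sub, ph', c, p + 1, s)
      else if ch == ')' then (sub, ph', c, p - 1, s)
      else if ch == '[' then (sub, ph', c, p, s + 1)
      else if ch == ']' then (sub, ph', c, p, s - 1)
      else (sub, ph', c, p, s)

-- Source B's `_scan`: the single pass plus the final end-of-string line flush
def vgsB_scan (code : String) : Int × Int × Int × Int :=
  match code.toList.foldl vgsB_step (0, 0, 0, 0, 0) with
  | (sub, ph, c, p, s) => ((if ph == 1 || ph == 2 then sub + 1 else sub), c, p, s)

def validate_go_syntax_py_alt (before_code : String) (after_code : String) : Bool :=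
  match vgsB_scan before_code with
  | (sub, c, p, s) =>
    if sub < 3 || c != 0 || p != 0 || s != 0 then false
    else
      match vgsB_scan after_code with
      | (sub2, c2, p2, s2) =>
        if sub2 < 3 || c2 != 0 || p2 != 0 || s2 != 0 then false
        else true

-- ===== PRECONDITION & SPEC =====
def Spec_validate_go_syntax_py (before_code : String) (after_code : String) (out : Bool) : Prop := out = validate_go_syntax_py_alt before_code after_code
instance (before_code : String) (after_code : String) (out : Bool) : Decidable (Spec_validate_go_syntax_py before_code after_code out) := by unfold Spec_validate_go_syntax_py; infer_instance

-- ===== CLAIM (what is proved, stated in full; the proofs are below) =====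
def Claim_equal_validate_go_syntax_py : Prop := ∀ (before_code : String) (after_code : String), Dom_validate_go_syntax_py before_code after_code → Spec_validate_go_syntax_py before_code after_code (validate_go_syntax_py before_code after_code)

-- ===== LEMMAS AND PROOFS =====

-- A's per-line keep predicate
def vgsSub (l : List Char) : Bool :=
  !(PySem.Chars.strip l).isEmpty && !(PySem.Chars.startswith (PySem.Chars.strip l) ['/', '/'])

-- the phase transition of B's machine for a non-newline character
def phStep (ph : Nat) (ch : Char) : Nat :=
  if ph == 0 then (if ch == '/' then 1 else if !(PySem.Chars.isspace ch) then 2 else 0)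
  else if ph == 1 then (if ch == '/' then 3 else 2)
  else ph

-- the (substantial, phase) projection of B's machine, including the newline branch
def sp2Step (st : Int × Nat) (ch : Char) : Int × Nat :=
  if ch == '\n' then ((if st.2 == 1 || st.2 == 2 then st.1 + 1 else st.1), 0)
  else (st.1, phStep st.2 ch)

-- the bracket-balance projection of B's machine
def brStep (a : Int × Int × Int) (ch : Char) : Int × Int × Int :=
  if ch == '{' then (a.1 + 1, a.2.1, a.2.2)
  else if ch == '}' then (a.1 - 1, a.2.1, a.2.2)
  else if ch == '(' then (a.1, a.2.1 + 1, a.2.2)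
  else if ch == ')' then (a.1, a.2.1 - 1, a.2.2)
  else if ch == '[' then (a.1, a.2.1, a.2.2 + 1)
  else if ch == ']' then (a.1, a.2.1, a.2.2 - 1)
  else a

-- the line splitter splitOn · ['\n'] computes, in structural-recursion form
def linesOf : List Char → List (List Char)
  | [] => [[]]
  | c :: t =>
    if c = '\n' then [] :: linesOf t
    else match linesOf t with
      | [] => [[c]]
      | h :: t' => (c :: h) :: t'

-- 1 if a finished line in this phase counts as substantial
def vgsBonus (ph : Nat) : Int := if ph == 1 || ph == 2 then 1 else 0

-- substantial-line count of a line list, the FIRST line continuing from phase ph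
def cntFrom (ph : Nat) : List (List Char) → Int
  | [] => 0
  | h :: t => vgsBonus (h.foldl phStep ph) + (t.map (fun l => vgsBonus (l.foldl phStep 0))).sum

theorem vgsB_step_proj (st : Int × Nat × Int × Int × Int) (ch : Char) :
    vgsB_step st ch = (((sp2Step (st.1, st.2.1) ch).1, (sp2Step (st.1, st.2.1) ch).2,
      brStep st.2.2 ch)) := by
  obtain ⟨sub, ph, c, p, s⟩ := st
  by_cases h : ch = '\n'
  · subst h
    rfl
  · by_cases h1 : ch = '{'
    · subst h1; rfl
    by_cases h2 : ch = '}'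
    · subst h2; rfl
    by_cases h3 : ch = '('
    · subst h3; rfl
    by_cases h4 : ch = ')'
    · subst h4; rfl
    by_cases h5 : ch = '['
    · subst h5; rfl
    by_cases h6 : ch = ']'
    · subst h6; rfl
    have e0 : (ch == '\n') = false := by simpa using h
    have e1 : (ch == '{') = false := by simpa using h1
    have e2 : (ch == '}') = false := by simpa using h2
    have e3 : (ch == '(') = false := by simpa using h3
    have e4 : (ch == ')') = false := by simpa using h4
    have e5 : (ch == '[') = false := by simpa using h5
    have e6 : (ch == ']') = false := by simpa using h6
    simp only [vgsB_step, sp2Step, brStep, phStep, e0, e1, e2, e3, e4, e5, e6,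
      Bool.false_eq_true, if_false]

theorem vgsB_fold_proj (l : List Char) (st : Int × Nat × Int × Int × Int) :
    l.foldl vgsB_step st = (((l.foldl sp2Step (st.1, st.2.1)).1, (l.foldl sp2Step (st.1, st.2.1)).2,
      l.foldl brStep st.2.2)) := by
  induction l generalizing st with
  | nil => rfl
  | cons x t ih => simp only [List.foldl_cons, ih, vgsB_step_proj]

-- the bracket pass computes the three signed count differences
theorem brStep_fold (l : List Char) (a : Int × Int × Int) :
    l.foldl brStep a =
      (a.1 + (l.count '{' : Int) - (l.count '}' : Int),
       a.2.1 + (l.count '(' : Int) - (l.count ')' : Int),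
       a.2.2 + (l.count '[' : Int) - (l.count ']' : Int)) := by
  induction l generalizing a with
  | nil => simp
  | cons x t ih =>
    simp only [List.foldl_cons, ih, List.count_cons]
    unfold brStep
    split_ifs with h1 h2 h3 h4 h5 h6
    all_goals clear ih
    all_goals simp only [beq_iff_eq] at *
    all_goals try subst_vars
    all_goals
      refine Prod.ext ?_ (Prod.ext ?_ ?_) <;> simp_all <;> omega

-- PySem.Chars.count with a single-character needle is List.count
theorem count_go_singleton (c : Char) (fuel : Nat) (l : List Char) (acc : Nat)
    (hf : l.length ≤ fuel) :
    PySem.Chars.count.go [c] fuel l acc = acc + l.count c := by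
  induction l generalizing fuel acc with
  | nil => cases fuel <;> simp [PySem.Chars.count.go]
  | cons x t ih =>
    cases fuel with
    | zero => simp at hf
    | succ n =>
      simp only [List.length_cons, Nat.succ_le_succ_iff] at hf
      by_cases hx : c = x
      · subst hx
        simp [PySem.Chars.count.go, List.isPrefixOf, ih n (acc + 1) hf]
        omega
      · have hpre : ([c].isPrefixOf (x :: t)) = false := by
          simp [List.isPrefixOf]
          exact fun h => hx h
        simp [PySem.Chars.count.go, hpre, ih n acc hf, List.count_cons]
        intro h
        exact absurd h.symm hx

theorem count_singleton (l : List Char) (c : Char) :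
    PySem.Chars.count l [c] = l.count c := by
  simp [PySem.Chars.count, count_go_singleton c l.length l 0 le_rfl]

-- splitOn on ['\n'] is linesOf
theorem linesOf_ne_nil (l : List Char) : linesOf l ≠ [] := by
  cases l with
  | nil => simp [linesOf]
  | cons c t =>
    unfold linesOf
    split_ifs
    · simp
    · cases h : linesOf t <;> simp

theorem splitOn_go_eq (l : List Char) (fuel : Nat) (cur : List Char) (acc : List (List Char))
    (hf : l.length < fuel) :
    PySem.Chars.splitOn.go ['\n'] fuel l cur acc =
      acc.reverse ++ (linesOf l).modifyHead (cur.reverse ++ ·) := by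
  induction l generalizing fuel cur acc with
  | nil =>
    cases fuel with
    | zero => omega
    | succ n => simp [PySem.Chars.splitOn.go, linesOf]
  | cons x t ih =>
    cases fuel with
    | zero => omega
    | succ n =>
      simp only [List.length_cons, Nat.succ_lt_succ_iff] at hf
      by_cases hx : x = '\n'
      · subst hx
        rw [show PySem.Chars.splitOn.go ['\n'] (n+1) ('\n' :: t) cur acc =
              PySem.Chars.splitOn.go ['\n'] n t [] (cur.reverse :: acc) by
            simp [PySem.Chars.splitOn.go, List.isPrefixOf]]
        rw [ih n [] (cur.reverse :: acc) hf]
        cases h : linesOf t with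
        | nil => exact absurd h (linesOf_ne_nil t)
        | cons a b => simp [linesOf, h]
      · rw [show PySem.Chars.splitOn.go ['\n'] (n+1) (x :: t) cur acc =
              PySem.Chars.splitOn.go ['\n'] n t (x :: cur) acc by
            simp [PySem.Chars.splitOn.go, List.isPrefixOf, Ne.symm hx]]
        rw [ih n (x :: cur) acc hf]
        cases h : linesOf t with
        | nil => exact absurd h (linesOf_ne_nil t)
        | cons a b => simp [linesOf, h, hx]

theorem splitOn_eq_linesOf (s : List Char) :
    PySem.Chars.splitOn s ['\n'] = linesOf s := by
  rw [PySem.Chars.splitOn, splitOn_go_eq s (s.length + 1) [] [] (by omega)]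
  cases h : linesOf s with
  | nil => exact absurd h (linesOf_ne_nil s)
  | cons a b => simp

-- the machine, run to the end and flushed, counts one vgsBonus per line
theorem sp2_fold_cnt (s : List Char) (sub : Int) (ph : Nat) :
    (if (s.foldl sp2Step (sub, ph)).2 == 1 || (s.foldl sp2Step (sub, ph)).2 == 2
       then (s.foldl sp2Step (sub, ph)).1 + 1 else (s.foldl sp2Step (sub, ph)).1)
      = sub + cntFrom ph (linesOf s) := by
  induction s generalizing sub ph with
  | nil => simp [cntFrom, linesOf, vgsBonus]; split_ifs <;> simp
  | cons x t ih =>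
    by_cases hx : x = '\n'
    · subst hx
      rw [show ((('\n' :: t).foldl sp2Step (sub, ph))) = t.foldl sp2Step
            ((if ph == 1 || ph == 2 then sub + 1 else sub), 0) by
          simp [sp2Step]]
      rw [ih]
      cases h : linesOf t with
      | nil => exact absurd h (linesOf_ne_nil t)
      | cons a b =>
        simp only [linesOf, h, cntFrom, vgsBonus]
        split_ifs <;> simp_all <;> ring
    · rw [show (((x :: t).foldl sp2Step (sub, ph))) = t.foldl sp2Step (sub, phStep ph x) by
          simp [sp2Step, hx]]
      rw [ih]
      cases h : linesOf t with
      | nil => exact absurd h (linesOf_ne_nil t)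
      | cons a b => simp [linesOf, hx, h, cntFrom]

-- ---- per-line classification: the phase machine agrees with strip/startswith ----

theorem rstrip_cons_of_not_space (c : Char) (t : List Char) (hc : PySem.Chars.isspace c = false) :
    PySem.Chars.rstrip (c :: t) = c :: PySem.Chars.rstrip t := by
  unfold PySem.Chars.rstrip
  rw [show (c :: t).reverse = t.reverse ++ [c] by simp, List.dropWhile_append]
  split_ifs with h
  · simp only [List.isEmpty_iff] at h
    simp [List.dropWhile, hc, h]
  · simp

theorem rstrip_head (d : Char) (t : List Char) :
    PySem.Chars.rstrip (d :: t) = [] ∨ ∃ r, PySem.Chars.rstrip (d :: t) = d :: r := by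
  unfold PySem.Chars.rstrip
  rw [show (d :: t).reverse = t.reverse ++ [d] by simp, List.dropWhile_append]
  split_ifs with h
  · cases hd : List.dropWhile PySem.Chars.isspace [d] with
    | nil => left; simp
    | cons a b =>
      right
      have : a = d ∧ b = [] := by
        have := List.dropWhile_sublist (p := PySem.Chars.isspace) (l := [d])
        rw [hd] at this
        rcases List.sublist_singleton.mp this with h1 | h1 <;> simp_all
      refine ⟨[], by simp [this.1, this.2]⟩
  · right; exact ⟨(List.dropWhile PySem.Chars.isspace t.reverse).reverse, by simp⟩

-- from phase 2 or 3 the machine never moves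
theorem phStep_fold_two (t : List Char) : t.foldl phStep 2 = 2 := by
  induction t with
  | nil => rfl
  | cons x r ih => simpa [phStep] using ih

theorem phStep_fold_three (t : List Char) : t.foldl phStep 3 = 3 := by
  induction t with
  | nil => rfl
  | cons x r ih => simpa [phStep] using ih

theorem line_class (l : List Char) :
    vgsBonus (l.foldl phStep 0) = if vgsSub l then 1 else 0 := by
  induction l with
  | nil => simp [vgsSub, PySem.Chars.strip, PySem.Chars.lstrip, PySem.Chars.rstrip, vgsBonus]
  | cons c t ih =>
    by_cases hws : PySem.Chars.isspace c
    · have h1 : phStep 0 c = 0 := by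
        have : (c == '/') = false := by
          simp only [beq_eq_false_iff_ne, ne_eq]
          rintro rfl; simp [PySem.Chars.isspace] at hws
        simp [phStep, this, hws]
      have h2 : PySem.Chars.strip (c :: t) = PySem.Chars.strip t := by
        simp [PySem.Chars.strip, PySem.Chars.lstrip, hws]
      simp only [List.foldl_cons, h1, ih, vgsSub, h2]
      rfl
    · by_cases hsl : c = '/'
      · subst hsl
        have h1 : phStep 0 '/' = 1 := by simp [phStep]
        have hstr : PySem.Chars.strip ('/' :: t) = PySem.Chars.rstrip ('/' :: t) := by
          simp [PySem.Chars.strip, PySem.Chars.lstrip, hws]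
        simp only [List.foldl_cons, h1]
        cases t with
        | nil =>
          simp [vgsBonus, vgsSub, hstr, PySem.Chars.rstrip,
            (by simp [PySem.Chars.isspace] : PySem.Chars.isspace '/' = false),
            PySem.Chars.startswith, List.isPrefixOf]
        | cons d t' =>
          by_cases hd : d = '/'
          · subst hd
            have : (('/' :: t').foldl phStep 1) = 3 := by
              simpa [phStep] using phStep_fold_three t'
            rw [this]
            have hr : PySem.Chars.strip ('/' :: '/' :: t') =
                '/' :: '/' :: PySem.Chars.rstrip t' := by
              rw [hstr, rstrip_cons_of_not_space _ _ (by simp [PySem.Chars.isspace]),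
                rstrip_cons_of_not_space _ _ (by simp [PySem.Chars.isspace])]
            simp [vgsBonus, vgsSub, hr, PySem.Chars.startswith, List.isPrefixOf]
          · have : ((d :: t').foldl phStep 1) = 2 := by
              have hd' : (d == '/') = false := by simpa using hd
              simpa [phStep, hd'] using phStep_fold_two t'
            rw [this]
            have hr : PySem.Chars.strip ('/' :: d :: t') =
                '/' :: PySem.Chars.rstrip (d :: t') := by
              rw [hstr, rstrip_cons_of_not_space _ _ (by simp [PySem.Chars.isspace])]
            rcases rstrip_head d t' with h | ⟨r, h⟩
            · simp [vgsBonus, vgsSub, hr, h, PySem.Chars.startswith, List.isPrefixOf]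
            · simp only [vgsBonus, vgsSub, hr, h, PySem.Chars.startswith, List.isEmpty_cons, Bool.not_false]
              simp [List.isPrefixOf]
              exact fun h' => absurd h'.symm hd
      · have h1 : phStep 0 c = 2 := by
          have : (c == '/') = false := by simpa using hsl
          simp [phStep, this, hws]
        have : (t.foldl phStep 2) = 2 := phStep_fold_two t
        simp only [List.foldl_cons, h1, this]
        have hr : PySem.Chars.strip (c :: t) = c :: PySem.Chars.rstrip t := by
          simp only [PySem.Chars.strip, PySem.Chars.lstrip, List.dropWhile_cons, hws,
            Bool.false_eq_true, if_false]
          exact rstrip_cons_of_not_space _ _ (by simpa using hws)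
        simp only [vgsBonus, vgsSub, hr, PySem.Chars.startswith]
        simp [List.isPrefixOf]
        exact fun h' => absurd h'.symm hsl

-- summing the per-line bonuses is counting A's kept lines
theorem sum_bonus (ls : List (List Char)) :
    (ls.map (fun l => vgsBonus (l.foldl phStep 0))).sum = (ls.countP vgsSub : Int) := by
  induction ls with
  | nil => simp
  | cons a b ih =>
    rw [List.map_cons, List.sum_cons, ih, line_class, List.countP_cons]
    split_ifs <;> push_cast <;> omega

theorem cntFrom_zero_eq_countP (ls : List (List Char)) (h : ls ≠ []) :
    cntFrom 0 ls = (ls.countP vgsSub : Int) := by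
  cases ls with
  | nil => exact absurd rfl h
  | cons a b =>
    simp only [cntFrom]
    rw [sum_bonus, line_class, List.countP_cons]
    split_ifs <;> push_cast <;> omega

-- per string: A's checks and B's scan agree
theorem vgs_one_eq (code : String) :
    vgsA_one code = (match vgsB_scan code with
      | (sub, c, p, s) => !(sub < 3 || c != 0 || p != 0 || s != 0)) := by
  unfold vgsA_one vgsB_scan
  rw [vgsB_fold_proj]
  have hsp := sp2_fold_cnt code.toList 0 0
  rw [cntFrom_zero_eq_countP _ (linesOf_ne_nil _)] at hsp
  simp only [zero_add] at hsp
  have hbr := brStep_fold code.toList ((0:Int), (0:Int), (0:Int))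
  simp only [zero_add] at hbr
  rcases hF : code.toList.foldl sp2Step ((0:Int), (0:Nat)) with ⟨sub, ph⟩
  rw [hF] at hsp
  simp only [hbr, splitOn_eq_linesOf, count_singleton]
  simp only at hsp
  have hlen : (((linesOf code.toList).filter
      (fun l => !(PySem.Chars.strip l).isEmpty &&
        !(PySem.Chars.startswith (PySem.Chars.strip l) ['/', '/']))).map PySem.Chars.strip).length
      = (linesOf code.toList).countP vgsSub := by
    simp only [List.length_map, List.countP_eq_length_filter]
    rfl
  rw [hlen]
  by_cases h3 : (linesOf code.toList).countP vgsSub < 3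
  · have : (if ph == 1 || ph == 2 then sub + 1 else sub) < 3 := by
      rw [hsp]; exact_mod_cast h3
    simp [h3]
    intro hge
    have this' : (if ph = 1 ∨ ph = 2 then sub + 1 else sub) < 3 := by
      split_ifs at this ⊢ <;> simp_all
    exact absurd hge (not_le.mpr this')
  · have : ¬ (if ph == 1 || ph == 2 then sub + 1 else sub) < 3 := by
      rw [hsp]; exact_mod_cast h3
    simp only [if_neg h3, Bool.or_eq_true,
      Bool.not_or]
    by_cases h1 : code.toList.count '{' = code.toList.count '}' <;>
      by_cases h2 : code.toList.count '(' = code.toList.count ')' <;>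
        by_cases h4 : code.toList.count '[' = code.toList.count ']' <;>
          simp [h1, h2, h4, sub_eq_zero, Nat.cast_inj]
    have this' : ¬(if ph = 1 ∨ ph = 2 then sub + 1 else sub) < 3 := by
      split_ifs at this ⊢ <;> simp_all
    omega

-- ===== VERDICT (by name: the statement is the Claim_ definition above) =====
theorem validate_go_syntax_py_spec : Claim_equal_validate_go_syntax_py := by
  intro b a _
  unfold Spec_validate_go_syntax_py validate_go_syntax_py validate_go_syntax_py_alt
  rw [vgs_one_eq b, vgs_one_eq a]
  cases hb : vgsB_scan b with
  | mk s1 r1 =>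
    obtain ⟨c1, p1, k1⟩ := r1
    cases ha : vgsB_scan a with
    | mk s2 r2 =>
      obtain ⟨c2, p2, k2⟩ := r2
      by_cases h1 : (s1 < 3 || c1 != 0 || p1 != 0 || k1 != 0) <;>
        by_cases h2 : (s2 < 3 || c2 != 0 || p2 != 0 || k2 != 0) <;>
          simp [h1, h2]
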